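-- pv_equiv track=rewrite | github.com/Elie224/Elibot | build_conversation_booster_datasets_fr.py | build_multiturn_rows
-- ===== SOURCE A (Python) =====
-- def build_multiturn_rows(target_rows: int) -> list[dict[str, str]]:
--     anchors = [
--         ("c'est quoi le machine learning", "definition de base + exemples metier"),
--         ("explique un pipeline ml", "etapes de collecte a monitoring"),
--         ("comment deployer avec fastapi", "contrats, erreurs, observabilite"),
--         ("comment gerer le drift", "surveillance, alerte, retraining"),
--         ("comment ameliorer un modele", "analyse d'erreurs, features, seuil"),
--     ]
--
--     follow_ups = [
--         "approfondis avec plus de details techniques",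
--         "donne des remarques d'expert",
--         "donne un exemple concret en production",
--         "quels controles faire chaque semaine",
--         "quels pieges je dois eviter",
--     ]
--
--     rows: list[dict[str, str]] = []
--     idx = 0
--     while len(rows) < target_rows:
--         anchor_q, anchor_a = anchors[idx % len(anchors)]
--         follow = follow_ups[idx % len(follow_ups)]
--
--         history = (
--             f"Utilisateur: {anchor_q} ||| "
--             f"Assistant: Reponse initiale: {anchor_a}. "
--             "Je peux detailler architecture, risques, et plan d'execution."
--         )
--         instruction = follow
--         response = (
--             "Approfondissement contextualise:\n"
--             "- Rappel du contexte: je reprends le sujet precedent pour garder le fil de la conversation.\n"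
--             "- Details techniques: definir entree/sortie, metrique, seuil, monitoring et plan de rollback.\n"
--             "- Remarques d'expert: prioriser les risques qui coutent le plus en production.\n"
--             "- Controle hebdo type: qualite data, drift, latence API, taux d'erreur et performance metier.\n"
--             "- Suite: si tu veux, je te fais un plan d'action sur 7 jours avec priorites."
--         )
--
--         rows.append(
--             {
--                 "instruction": instruction,
--                 "response": response,
--                 "history": history,
--                 "source": "multiturn_conversation_booster",
--             }
--         )
--         idx += 1
--     return rows
-- ===== SOURCE B (Python) =====
-- def build_multiturn_rows(target_rows: int) -> list[dict[str, str]]: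
--     anchors = [
--         ("c'est quoi le machine learning", "definition de base + exemples metier"),
--         ("explique un pipeline ml", "etapes de collecte a monitoring"),
--         ("comment deployer avec fastapi", "contrats, erreurs, observabilite"),
--         ("comment gerer le drift", "surveillance, alerte, retraining"),
--         ("comment ameliorer un modele", "analyse d'erreurs, features, seuil"),
--     ]
--
--     follow_ups = [
--         "approfondis avec plus de details techniques",
--         "donne des remarques d'expert",
--         "donne un exemple concret en production",
--         "quels controles faire chaque semaine",
--         "quels pieges je dois eviter",
--     ]
--
--     response = (
--         "Approfondissement contextualise:\n"
--         "- Rappel du contexte: je reprends le sujet precedent pour garder le fil de la conversation.\n"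
--         "- Details techniques: definir entree/sortie, metrique, seuil, monitoring et plan de rollback.\n"
--         "- Remarques d'expert: prioriser les risques qui coutent le plus en production.\n"
--         "- Controle hebdo type: qualite data, drift, latence API, taux d'erreur et performance metier.\n"
--         "- Suite: si tu veux, je te fais un plan d'action sur 7 jours avec priorites."
--     )
--
--     # Build the 5 distinct template rows once (idx % 5 only ever selects these).
--     templates = [
--         {
--             "instruction": follow,
--             "response": response,
--             "history": (
--                 f"Utilisateur: {anchor_q} ||| "
--                 f"Assistant: Reponse initiale: {anchor_a}. "
--                 "Je peux detailler architecture, risques, et plan d'execution."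
--             ),
--             "source": "multiturn_conversation_booster",
--         }
--         for (anchor_q, anchor_a), follow in zip(anchors, follow_ups)
--     ]
--
--     # Cycle through the table, emitting a fresh dict per row.
--     return [dict(templates[i % len(templates)]) for i in range(max(0, target_rows))]
-- ===== Notes on version B (the rewrite author's own statement) =====
-- stated objective: simpler
-- what changed: B precomputes the few distinct template rows once (zip of anchors and follow_ups) and returns a range comprehension cycling through that table by index modulo its length, instead of A's while/append loop re-running all the f-string formatting on every iteration.
import Mathlib
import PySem

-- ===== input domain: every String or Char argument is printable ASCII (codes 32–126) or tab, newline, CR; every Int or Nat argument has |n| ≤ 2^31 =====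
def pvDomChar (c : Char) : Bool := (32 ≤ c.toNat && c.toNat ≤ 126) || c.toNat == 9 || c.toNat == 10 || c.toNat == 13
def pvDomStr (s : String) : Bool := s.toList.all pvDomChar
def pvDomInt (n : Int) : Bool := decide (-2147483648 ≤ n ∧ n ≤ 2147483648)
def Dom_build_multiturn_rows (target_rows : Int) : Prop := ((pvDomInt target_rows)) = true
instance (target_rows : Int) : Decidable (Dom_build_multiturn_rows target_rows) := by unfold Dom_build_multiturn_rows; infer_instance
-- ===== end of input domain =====

-- B builds the 5 distinct template rows once and cycles through the table with a
-- range comprehension, instead of re-running the string formatting in a while/append loop (objective: simpler).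

-- ===== PORT A =====
def pvAnchors : List (String × String) := [
  ("c'est quoi le machine learning", "definition de base + exemples metier"),
  ("explique un pipeline ml", "etapes de collecte a monitoring"),
  ("comment deployer avec fastapi", "contrats, erreurs, observabilite"),
  ("comment gerer le drift", "surveillance, alerte, retraining"),
  ("comment ameliorer un modele", "analyse d'erreurs, features, seuil")]

def pvFollowUps : List String := [
  "approfondis avec plus de details techniques",
  "donne des remarques d'expert",
  "donne un exemple concret en production",
  "quels controles faire chaque semaine",
  "quels pieges je dois eviter"]

def pvResponse : String := "Approfondissement contextualise:\n- Rappel du contexte: je reprends le sujet precedent pour garder le fil de la conversation.\n- Details techniques: definir entree/sortie, metrique, seuil, monitoring et plan de rollback.\n- Remarques d'expert: prioriser les risques qui coutent le plus en production.\n- Controle hebdo type: qualite data, drift, latence API, taux d'erreur et performance metier.\n- Suite: si tu veux, je te fais un plan d'action sur 7 jours avec priorites."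

-- one iteration body of A's while loop; the .getD defaults are unreachable
-- (idx % 5 is always a valid index of the 5-element lists, so Python never raises)
def pvRowA (idx : Int) : List (String × String) :=
  let anchor := (PySem.List.pyGet? pvAnchors (PySem.Int.mod idx (pvAnchors.length : Int))).getD ("", "")
  let follow := (PySem.List.pyGet? pvFollowUps (PySem.Int.mod idx (pvFollowUps.length : Int))).getD ""
  let history := "Utilisateur: " ++ anchor.1 ++ " ||| " ++ "Assistant: Reponse initiale: " ++ anchor.2 ++ ". " ++ "Je peux detailler architecture, risques, et plan d'execution."
  [("instruction", follow), ("response", pvResponse), ("history", history),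
   ("source", "multiturn_conversation_booster")]

def pvLoopA (target : Int) (rows : List (List (String × String))) (idx : Int) :
    List (List (String × String)) :=
  if (rows.length : Int) < target then
    pvLoopA target (rows ++ [pvRowA idx]) (idx + 1)
  else rows
termination_by (target - rows.length).toNat
decreasing_by simp [List.length_append]; omega

def build_multiturn_rows (target_rows : Int) : List (List (String × String)) :=
  pvLoopA target_rows [] 0

-- ===== PORT B =====
-- the 5 template rows, built once from zip(anchors, follow_ups)
def pvTemplates : List (List (String × String)) :=
  (pvAnchors.zip pvFollowUps).map (fun p =>
    [("instruction", p.2), ("response", pvResponse),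
     ("history", "Utilisateur: " ++ p.1.1 ++ " ||| " ++ "Assistant: Reponse initiale: " ++ p.1.2 ++ ". " ++ "Je peux detailler architecture, risques, et plan d'execution."),
     ("source", "multiturn_conversation_booster")])

-- the .getD default is unreachable (i % 5 is a valid index of the 5 templates)
def build_multiturn_rows_alt (target_rows : Int) : List (List (String × String)) :=
  (List.range (max 0 target_rows).toNat).map (fun (i : Nat) =>
    (PySem.List.pyGet? pvTemplates (PySem.Int.mod (i : Int) (pvTemplates.length : Int))).getD [])

-- ===== PRECONDITION & SPEC =====
def Spec_build_multiturn_rows (target_rows : Int) (out : List (List (String × String))) : Prop := out = build_multiturn_rows_alt target_rows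
instance (target_rows : Int) (out : List (List (String × String))) : Decidable (Spec_build_multiturn_rows target_rows out) := by unfold Spec_build_multiturn_rows; infer_instance

-- ===== CLAIM (what is proved, stated in full; the proofs are below) =====
def Claim_equal_build_multiturn_rows : Prop := ∀ (target_rows : Int), Dom_build_multiturn_rows target_rows → Spec_build_multiturn_rows target_rows (build_multiturn_rows target_rows)

-- ===== LEMMAS AND PROOFS =====

-- A's loop appends one row per step, target - len(rows) many times
theorem pvLoopA_spec (n : Nat) : ∀ (t : Int) (rows : List (List (String × String))) (idx : Int),
    (t - rows.length).toNat = n →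
    pvLoopA t rows idx = rows ++ (List.range n).map (fun (k : Nat) => pvRowA (idx + (k : Int))) := by
  induction n with
  | zero =>
    intro t rows idx h
    rw [pvLoopA]
    have : ¬ ((rows.length : Int) < t) := by omega
    simp [this]
  | succ n ih =>
    intro t rows idx h
    rw [pvLoopA]
    have hlt : (rows.length : Int) < t := by omega
    simp only [hlt, if_pos]
    rw [ih t (rows ++ [pvRowA idx]) (idx + 1) (by simp [List.length_append]; omega)]
    rw [List.range_succ_eq_map, List.map_cons, List.map_map]
    simp only [List.append_assoc, List.singleton_append, Nat.cast_zero, add_zero]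
    congr 1
    congr 1
    apply List.map_congr_left
    intro k _
    simp only [Function.comp]
    congr 1
    push_cast
    ring

-- each row A emits equals the template B looks up
theorem pvRowA_eq_template (k : Nat) :
    pvRowA (k : Int) =
      (PySem.List.pyGet? pvTemplates (PySem.Int.mod (k : Int) (pvTemplates.length : Int))).getD [] := by
  have hmod : ∀ (L : Nat), L = 5 → PySem.Int.mod (k : Int) (L : Int) = ((k % 5 : Nat) : Int) := by
    intro L hL; subst hL; exact_mod_cast PySem.Int.mod_natCast k 5
  have h5 : k % 5 < 5 := Nat.mod_lt _ (by norm_num)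
  have hA : pvAnchors.length = 5 := by decide
  have hF : pvFollowUps.length = 5 := by decide
  have hT : pvTemplates.length = 5 := by decide
  rw [pvRowA]
  rw [hmod _ hA, hmod _ hF, hmod _ hT]
  simp only [PySem.List.pyGet?_natCast]
  rw [pvTemplates]
  set m := k % 5 with hm
  interval_cases m <;> rfl

theorem max_toNat (t : Int) : (max 0 t).toNat = t.toNat := by omega

-- ===== VERDICT (by name: the statement is the Claim_ definition above) =====
theorem build_multiturn_rows_spec : Claim_equal_build_multiturn_rows := by
  intro t _
  unfold Spec_build_multiturn_rows build_multiturn_rows build_multiturn_rows_alt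
  rw [pvLoopA_spec t.toNat t [] 0 (by simp)]
  rw [max_toNat]
  simp only [List.nil_append]
  apply List.map_congr_left
  intro k _
  rw [zero_add]
  exact pvRowA_eq_template k
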